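-- pv_equiv track=rewrite | github.com/Aschio12/DATA-STRUCURE-AND-ALGORITHIM | leetcode/easy/Determine Whether Matrix Can Be Obtained By Rotation.py | findRotation
-- ===== SOURCE A (Python) =====
-- def findRotation(mat, target):
--     n = len(mat)
--     if mat == target:
--         return True
--
--     def rotate90(matrix):
--         n_val = len(matrix)
--         rotated = [[0] * n_val for _ in range(len(matrix[0]))]
--         for i in range(n_val):
--             for j in range(n_val):
--                 rotated[i][j] = matrix[n_val - 1 - j][i]
--         return rotated
--
--     current = mat
--     for _ in range(3):
--         current = rotate90(current)
--         if current == target: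
--             return True
--
--     return False
-- ===== SOURCE B (Python) =====
-- def findRotation(mat, target):
--     n = len(mat)
--     ok = [True, True, True, True]
--     for i in range(n):
--         for j in range(n):
--             t = target[i][j]
--             if t != mat[i][j]:
--                 ok[0] = False
--             if t != mat[n - 1 - j][i]:
--                 ok[1] = False
--             if t != mat[n - 1 - i][n - 1 - j]:
--                 ok[2] = False
--             if t != mat[j][n - 1 - i]:
--                 ok[3] = False
--     return any(ok)
-- ===== Notes on version B (the rewrite author's own statement) =====
-- stated objective: simpler
-- what changed: B builds no rotated matrices at all: one pass over the n*n cells maintains four boolean flags, comparing target[i][j] against the element each of the four rotations would place there, and returns any(flags); A materialises up to three rotated copies and compares whole matrices.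
-- outside the precondition, e.g. on findRotation([[1]], []): A returns False, B raises IndexError
import Mathlib
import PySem

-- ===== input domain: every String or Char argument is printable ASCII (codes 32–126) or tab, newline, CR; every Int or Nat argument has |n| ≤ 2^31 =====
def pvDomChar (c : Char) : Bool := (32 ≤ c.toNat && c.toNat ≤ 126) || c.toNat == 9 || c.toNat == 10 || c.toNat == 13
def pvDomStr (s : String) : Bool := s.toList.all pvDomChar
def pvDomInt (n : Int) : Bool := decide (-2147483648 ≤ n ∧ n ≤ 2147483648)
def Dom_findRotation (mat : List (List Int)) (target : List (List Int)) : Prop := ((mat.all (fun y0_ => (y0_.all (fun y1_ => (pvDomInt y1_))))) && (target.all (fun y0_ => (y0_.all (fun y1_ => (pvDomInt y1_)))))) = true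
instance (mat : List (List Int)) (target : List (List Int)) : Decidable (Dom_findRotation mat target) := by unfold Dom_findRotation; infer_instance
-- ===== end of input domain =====

-- B fuses A's "build up to three rotated matrices and compare" into one cell pass
-- maintaining four boolean flags (one per rotation); objective: simpler, same O(n^2) cost.
-- Pre_ restricts to the problem's guaranteed shape (mat and target both n×n with n = len(mat));
-- outside it A usually raises IndexError inside rotate90 but can also return a bare == result
-- (e.g. A([[1]], []) = False) where B's cell indexing raises.


-- ===== PORT A =====
-- rotate90: rotated = [[0]*n_val for _ in range(len(matrix[0]))], then the two nested
-- assignment loops, transcribed as foldl over List.range with List.set (set/getD out of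
-- range, where Python would raise, is excluded by Pre_).
def rotate90A (matrix : List (List Int)) : List (List Int) :=
  let nv := matrix.length
  let rotated := List.replicate (matrix.headD []).length (List.replicate nv (0 : Int))
  (List.range nv).foldl (fun rot i =>
    (List.range nv).foldl (fun rot j =>
      rot.set i ((rot.getD i []).set j ((matrix.getD (nv - 1 - j) []).getD i 0))) rot) rotated

-- the for _ in range(3) loop with early return, unrolled to its three iterations
def findRotation (mat : List (List Int)) (target : List (List Int)) : Bool :=
  if mat = target then true
  else
    let c1 := rotate90A mat
    if c1 = target then true
    else
      let c2 := rotate90A c1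
      if c2 = target then true
      else
        let c3 := rotate90A c2
        decide (c3 = target)

-- ===== PORT B =====
-- one pass over all cells, four flags (ok[0..3]) carried as a Bool 4-tuple
def findRotation_alt (mat : List (List Int)) (target : List (List Int)) : Bool :=
  let n := mat.length
  let s := (List.range n).foldl (fun s i =>
    (List.range n).foldl (fun (s : Bool × Bool × Bool × Bool) j =>
      let t := (target.getD i []).getD j 0
      ( s.1 && decide (t = (mat.getD i []).getD j 0),
        s.2.1 && decide (t = (mat.getD (n - 1 - j) []).getD i 0),
        s.2.2.1 && decide (t = (mat.getD (n - 1 - i) []).getD (n - 1 - j) 0),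
        s.2.2.2 && decide (t = (mat.getD j []).getD (n - 1 - i) 0))) s) (true, true, true, true)
  s.1 || s.2.1 || s.2.2.1 || s.2.2.2

-- ===== PRECONDITION & SPEC =====
-- Pre_: mat and target are both n×n squares with n = mat.length (the problem's guarantee).
-- Outside it A usually raises IndexError inside rotate90, though on some shape mismatches it
-- returns the bare == comparison while B's cell indexing raises.
def Pre_findRotation (mat : List (List Int)) (target : List (List Int)) : Prop :=
  (∀ r ∈ mat, r.length = mat.length) ∧ target.length = mat.length ∧
    (∀ r ∈ target, r.length = mat.length)
instance (mat : List (List Int)) (target : List (List Int)) : Decidable (Pre_findRotation mat target) := by unfold Pre_findRotation; infer_instance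

def pvWitness_findRotation : List (List Int) × List (List Int) := ([[1, 2], [3, 4]], [[3, 1], [4, 2]])

def Spec_findRotation (mat : List (List Int)) (target : List (List Int)) (out : Bool) : Prop := out = findRotation_alt mat target
instance (mat : List (List Int)) (target : List (List Int)) (out : Bool) : Decidable (Spec_findRotation mat target out) := by unfold Spec_findRotation; infer_instance

-- ===== CLAIM (what is proved, stated in full; the proofs are below) =====
def Claim_equal_findRotation : Prop := ∀ (mat : List (List Int)) (target : List (List Int)), Dom_findRotation mat target → Pre_findRotation mat target → Spec_findRotation mat target (findRotation mat target)

-- ===== LEMMAS AND PROOFS =====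

-- cell access, and squareness phrased through getD
def ent (m : List (List Int)) (i j : Nat) : Int := (m.getD i []).getD j 0

def Sq (n : Nat) (m : List (List Int)) : Prop := m.length = n ∧ ∀ i < n, (m.getD i []).length = n

theorem sq_of_pre {n : Nat} {m : List (List Int)} (hl : m.length = n)
    (hr : ∀ r ∈ m, r.length = n) : Sq n m := by
  refine ⟨hl, fun i hi => ?_⟩
  have hi' : i < m.length := hl ▸ hi
  rw [List.getD_eq_getElem m [] hi']
  exact hr _ (List.getElem_mem hi')

-- inner fill loop of rotate90A: only row i is touched
theorem inner_fill (v : Nat → Int) (i : Nat) :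
    ∀ (l : List Nat) (rot : List (List Int)),
      l.foldl (fun rot j => rot.set i ((rot.getD i []).set j (v j))) rot =
        rot.set i (l.foldl (fun row j => row.set j (v j)) (rot.getD i [])) := by
  intro l
  induction l with
  | nil =>
    intro rot
    by_cases hi : i < rot.length
    · rw [List.foldl_nil, List.getD_eq_getElem _ _ hi]
      exact (List.set_getElem_self hi).symm
    · rw [List.foldl_nil, List.set_eq_of_length_le (by omega)]
  | cons j l ih =>
    intro rot
    simp only [List.foldl_cons, ih]
    by_cases hi : i < rot.length
    · have hg : (rot.set i ((rot.getD i []).set j (v j))).getD i [] =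
          (rot.getD i []).set j (v j) := by
        rw [List.getD_eq_getElem _ _ (by simpa using hi)]
        exact List.getElem_set_self (by simpa using hi)
      rw [hg, List.set_set]
    · have h0 : rot.getD i [] = [] := List.getD_eq_default _ _ (by omega)
      have hset : ∀ x, rot.set i x = rot := fun x => List.set_eq_of_length_le (by omega)
      simp [hset]

-- row fill: sets position j to v j for every j in l
theorem row_fill (v : Nat → Int) :
    ∀ (l : List Nat) (row : List Int),
      ((l.foldl (fun row j => row.set j (v j)) row).length = row.length) ∧
      (∀ j, j < row.length →
        (l.foldl (fun row j => row.set j (v j)) row).getD j 0 =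
          if j ∈ l then v j else row.getD j 0) := by
  intro l
  induction l with
  | nil => intro row; simp
  | cons a l ih =>
    intro row
    simp only [List.foldl_cons]
    obtain ⟨ihl, ihe⟩ := ih (row.set a (v a))
    refine ⟨by simpa using ihl, fun j hj => ?_⟩
    have hj' : j < (row.set a (v a)).length := by simpa using hj
    rw [ihe j hj']
    by_cases hjl : j ∈ l
    · simp [hjl]
    · by_cases hja : j = a
      · subst hja
        have hs : (row.set j (v j)).getD j 0 = v j := by
          rw [List.getD_eq_getElem _ _ hj']
          exact List.getElem_set_self (by simpa using hj)
        rw [if_neg hjl, hs]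
        simp
      · simp only [List.mem_cons, hjl, hja, or_self, if_false]
        rw [List.getD_eq_getElem _ _ hj', List.getD_eq_getElem _ (0:Int) hj,
          List.getElem_set_ne (by omega)]

-- outer loop of rotate90A
theorem outer_fill (n : Nat) (v : Nat → Nat → Int) :
    ∀ (l : List Nat) (rot : List (List Int)), rot.length = n →
      (∀ i < n, (rot.getD i []).length = n) → (∀ i ∈ l, i < n) →
      (let res := l.foldl (fun rot i =>
          (List.range n).foldl (fun rot j => rot.set i ((rot.getD i []).set j (v i j))) rot) rot
       res.length = n ∧ (∀ i < n, (res.getD i []).length = n) ∧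
         ∀ i < n, ∀ j < n, (res.getD i []).getD j 0 =
           if i ∈ l then v i j else (rot.getD i []).getD j 0) := by
  intro l
  induction l with
  | nil => intro rot h1 h2 _; exact ⟨h1, h2, by simp⟩
  | cons a l ih =>
    intro rot h1 h2 h3
    rw [List.foldl_cons, inner_fill]
    have ha : a < n := h3 a (by simp)
    have ha' : a < rot.length := by omega
    set F := (List.range n).foldl (fun row j => row.set j (v a j)) (rot.getD a []) with hF
    set rot' := rot.set a F with hrot'
    have hlen' : rot'.length = n := by simp [hrot', h1]
    have hgrow : ∀ i, i < n → rot'.getD i [] = if i = a then F else rot.getD i [] := by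
      intro i hi
      have hilen : i < rot.length := by omega
      by_cases hia : i = a
      · subst hia
        rw [hrot', List.getD_eq_getElem _ _ (by simpa using hilen), if_pos rfl]
        exact List.getElem_set_self (by simpa using hilen)
      · rw [hrot', List.getD_eq_getElem _ _ (by simpa using hilen), if_neg hia,
          List.getElem_set_ne (by omega), ← List.getD_eq_getElem _ [] hilen]
    have hFlen : F.length = n := by
      rw [hF, (row_fill (v a) (List.range n) (rot.getD a [])).1]; exact h2 a ha
    have hrow' : ∀ i < n, (rot'.getD i []).length = n := by
      intro i hi
      rw [hgrow i hi]
      by_cases hia : i = a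
      · simp [hia, hFlen]
      · simp [hia]; exact h2 i hi
    obtain ⟨r1, r2, r3⟩ := ih rot' hlen' hrow' (fun i hi => h3 i (by simp [hi]))
    refine ⟨r1, r2, fun i hi j hj => ?_⟩
    rw [r3 i hi j hj]
    by_cases hil : i ∈ l
    · simp [hil]
    · simp only [hil, if_false, List.mem_cons, or_false]
      rw [hgrow i hi]
      by_cases hia : i = a
      · subst hia
        rw [if_pos rfl, hF, (row_fill (v i) (List.range n) (rot.getD i [])).2 j (by rw [h2 i ha]; exact hj)]
        simp [hj]
      · simp [hia]

theorem rotate90A_spec {n : Nat} {m : List (List Int)} (h : Sq n m) :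
    Sq n (rotate90A m) ∧ ∀ i < n, ∀ j < n, ent (rotate90A m) i j = ent m (n - 1 - j) i := by
  obtain ⟨hl, hr⟩ := h
  have hhead : (m.headD []).length = n := by
    cases m with
    | nil => simp at hl ⊢; omega
    | cons r t =>
      have h0 := hr 0 (by simp at hl; omega)
      simpa using h0
  have h2 : ∀ i < n, ((List.replicate (m.headD []).length
      (List.replicate m.length (0 : Int))).getD i []).length = n := by
    intro i hi
    rw [List.getD_eq_getElem _ _ (by rw [List.length_replicate, hhead]; exact hi), List.getElem_replicate]
    simpa using hl
  obtain ⟨r1, r2, r3⟩ := outer_fill n (fun i j => (m.getD (n - 1 - j) []).getD i 0)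
    (List.range n) (List.replicate (m.headD []).length (List.replicate m.length (0 : Int)))
    (by rw [List.length_replicate]; exact hhead) h2 (fun i hi => List.mem_range.mp hi)
  have hdef : rotate90A m = (List.range n).foldl (fun rot i =>
      (List.range n).foldl (fun rot j =>
        rot.set i ((rot.getD i []).set j ((m.getD (n - 1 - j) []).getD i 0))) rot)
      (List.replicate (m.headD []).length (List.replicate m.length (0 : Int))) := by
    simp only [rotate90A, hl]
  rw [hdef]
  refine ⟨⟨r1, r2⟩, fun i hi j hj => ?_⟩
  simp only [ent]
  rw [r3 i hi j hj, if_pos (List.mem_range.mpr hi)]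

-- B's inner/outer loops: a fold of four independently-ANDed flags is the 4-tuple of List.all
theorem foldl_and4 (p1 p2 p3 p4 : Nat → Bool) :
    ∀ (l : List Nat) (s : Bool × Bool × Bool × Bool),
      l.foldl (fun s x => (s.1 && p1 x, s.2.1 && p2 x, s.2.2.1 && p3 x, s.2.2.2 && p4 x)) s =
        (s.1 && l.all p1, s.2.1 && l.all p2, s.2.2.1 && l.all p3, s.2.2.2 && l.all p4) := by
  intro l
  induction l with
  | nil => intro s; simp
  | cons x l ih => intro s; simp [List.foldl_cons, ih, Bool.and_assoc]

theorem ent_fold (m : List (List Int)) (i j : Nat) :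
    (m.getD i []).getD j 0 = ent m i j := rfl

theorem mat_eq_iff {n : Nat} {X Y : List (List Int)} (hX : Sq n X) (hY : Sq n Y) :
    X = Y ↔ ∀ i < n, ∀ j < n, ent X i j = ent Y i j := by
  constructor
  · rintro rfl; intro i _ j _; rfl
  · intro h
    have hxl : X.length = n := hX.1
    have hyl : Y.length = n := hY.1
    apply List.ext_getElem (by omega)
    intro i h1 h2
    have hi : i < n := by omega
    have hx : X[i] = X.getD i [] := (List.getD_eq_getElem _ _ h1).symm
    have hy : Y[i] = Y.getD i [] := (List.getD_eq_getElem _ _ h2).symm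
    have hxr : X[i].length = n := by rw [hx]; exact hX.2 i hi
    have hyr : Y[i].length = n := by rw [hy]; exact hY.2 i hi
    apply List.ext_getElem (by omega)
    intro j hj1 hj2
    have hj : j < n := by omega
    have := h i hi j hj
    rw [ent, ent, ← hx, ← hy, List.getD_eq_getElem _ _ hj1, List.getD_eq_getElem _ _ hj2] at this
    exact this

-- an early-return `if x == target: return True` step of A, as a Bool disjunction
theorem if_eq_or (a b : List (List Int)) (x : Bool) :
    (if a = b then true else x) = (decide (a = b) || x) := by
  by_cases h : a = b <;> simp [h]

-- a four-flag pass over range n is the decide of the pointwise statement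
theorem all2_eq_decide (n : Nat) (p : Nat → Nat → Bool) :
    ((List.range n).all fun i => (List.range n).all fun j => p i j) =
      decide (∀ i < n, ∀ j < n, p i j = true) := by
  rw [Bool.eq_iff_iff]
  simp [List.all_eq_true, List.mem_range]

theorem flag_eq_decide {n : Nat} {X target : List (List Int)} (hX : Sq n X) (hT : Sq n target)
    (e : Nat → Nat → Int) (he : ∀ i < n, ∀ j < n, ent X i j = e i j) :
    ((List.range n).all fun i => (List.range n).all fun j =>
        decide (ent target i j = e i j)) = decide (X = target) := by
  rw [all2_eq_decide]
  apply decide_eq_decide.mpr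
  rw [mat_eq_iff hX hT]
  constructor
  · intro h i hi j hj
    have := h i hi j hj
    rw [decide_eq_true_eq] at this
    rw [he i hi j hj, this]
  · intro h i hi j hj
    rw [decide_eq_true_eq, ← he i hi j hj]
    exact (h i hi j hj).symm

-- ===== VERDICT (by name: the statement is the Claim_ definition above) =====
theorem findRotation_spec : Claim_equal_findRotation := by
  intro mat target _ hpre
  obtain ⟨hmr, htl, htr⟩ := hpre
  unfold Spec_findRotation
  have hsm : Sq mat.length mat := sq_of_pre rfl hmr
  have hst : Sq mat.length target := sq_of_pre htl htr
  obtain ⟨hs1, he1⟩ := rotate90A_spec hsm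
  obtain ⟨hs2, he2⟩ := rotate90A_spec hs1
  obtain ⟨hs3, he3⟩ := rotate90A_spec hs2
  set n := mat.length with hn
  have E2 : ∀ i < n, ∀ j < n, ent (rotate90A (rotate90A mat)) i j =
      ent mat (n - 1 - i) (n - 1 - j) := by
    intro i hi j hj
    rw [he2 i hi j hj, he1 (n - 1 - j) (by omega) i hi]
  have E3 : ∀ i < n, ∀ j < n, ent (rotate90A (rotate90A (rotate90A mat))) i j =
      ent mat j (n - 1 - i) := by
    intro i hi j hj
    rw [he3 i hi j hj, E2 (n - 1 - j) (by omega) i hi]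
    congr 1
    omega
  have hB : findRotation_alt mat target =
      (((decide (mat = target) || decide (rotate90A mat = target)) ||
        decide (rotate90A (rotate90A mat) = target)) ||
          decide (rotate90A (rotate90A (rotate90A mat)) = target)) := by
    simp only [findRotation_alt, foldl_and4, Bool.true_and, ← hn]
    simp only [ent_fold]
    have F0 : ((List.range n).all fun i => (List.range n).all fun j =>
        decide (ent target i j = ent mat i j)) = decide (mat = target) :=
      flag_eq_decide hsm hst _ (fun i _ j _ => rfl)
    have F1 : ((List.range n).all fun i => (List.range n).all fun j =>
        decide (ent target i j = ent mat (n - 1 - j) i)) = decide (rotate90A mat = target) :=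
      flag_eq_decide hs1 hst _ he1
    have F2 : ((List.range n).all fun i => (List.range n).all fun j =>
        decide (ent target i j = ent mat (n - 1 - i) (n - 1 - j))) =
          decide (rotate90A (rotate90A mat) = target) :=
      flag_eq_decide hs2 hst _ E2
    have F3 : ((List.range n).all fun i => (List.range n).all fun j =>
        decide (ent target i j = ent mat j (n - 1 - i))) =
          decide (rotate90A (rotate90A (rotate90A mat)) = target) :=
      flag_eq_decide hs3 hst _ E3
    exact congrArg₂ (· || ·) (congrArg₂ (· || ·) (congrArg₂ (· || ·) F0 F1) F2) F3
  rw [hB]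
  simp only [findRotation, if_eq_or]
  simp [Bool.or_assoc]
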